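-- pv_equiv track=rewrite | github.com/axelsmagichammer/A112509 | src/algorithms/surgical_nudge.py | _extract_rle
-- ===== SOURCE A (Python) =====
-- from typing import List, Optional, Tuple
--
-- def _extract_rle(s: str) -> Tuple[List[int], List[int]]:
--     """Extract (ones_blocks, sep_lengths) from a bitstring."""
--     runs = []
--     i = 0
--     while i < len(s):
--         c = s[i]; j = i
--         while j < len(s) and s[j] == c:
--             j += 1
--         runs.append((c, j - i))
--         i = j
--     ones_blocks = [length for c, length in runs if c == '1']
--     sep_lengths = [length for c, length in runs if c == '0']
--     return ones_blocks, sep_lengths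
-- ===== SOURCE B (Python) =====
-- from typing import List, Tuple
--
-- def _extract_rle(s: str) -> Tuple[List[int], List[int]]:
--     """Extract (ones_blocks, sep_lengths) from a bitstring."""
--     def runs_of(ch: str) -> List[int]:
--         out = []
--         n = 0
--         for c in s:
--             if c == ch:
--                 n += 1
--             elif n:
--                 out.append(n)
--                 n = 0
--         if n:
--             out.append(n)
--         return out
--     return runs_of('1'), runs_of('0')
-- ===== Notes on version B (the rewrite author's own statement) =====
-- stated objective: simpler
-- what changed: Replaces the tagged run-length pass (build a list of (char, length) runs, then filter it twice) by two independent single-counter scans, one per bit value, with no intermediate run list; the counter scans avoid per-run inner-loop indexing and tuple building, a constant-factor win.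
import Mathlib
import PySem

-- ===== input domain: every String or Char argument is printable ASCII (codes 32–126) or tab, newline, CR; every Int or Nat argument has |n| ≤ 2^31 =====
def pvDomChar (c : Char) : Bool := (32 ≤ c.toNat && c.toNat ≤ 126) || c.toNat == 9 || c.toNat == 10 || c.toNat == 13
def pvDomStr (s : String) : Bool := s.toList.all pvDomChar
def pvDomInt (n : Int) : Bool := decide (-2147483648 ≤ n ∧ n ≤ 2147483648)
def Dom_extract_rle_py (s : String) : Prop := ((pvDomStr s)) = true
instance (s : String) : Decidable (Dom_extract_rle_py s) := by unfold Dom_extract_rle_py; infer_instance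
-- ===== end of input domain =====

-- B replaces A's tagged run list + two filters by two independent counter passes (one per digit); objective: simpler, same O(n) cost.

-- ===== PORT A =====
-- inner while loop: advance j while s[j] == c; returns (run length, rest)
def countRunA (c : Char) : List Char → Nat × List Char
  | [] => (0, [])
  | x :: xs => if x == c then let p := countRunA c xs; (p.1 + 1, p.2) else (0, x :: xs)

theorem countRunA_len (c : Char) (xs : List Char) : (countRunA c xs).2.length ≤ xs.length := by
  induction xs with
  | nil => simp [countRunA]
  | cons x xs ih =>
    simp only [countRunA]
    split
    · exact Nat.le_succ_of_le ih
    · simp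

-- outer while loop building the tagged run list
def arunsA : List Char → List (Char × Int)
  | [] => []
  | c :: xs =>
      let p := countRunA c xs
      (c, (p.1 : Int) + 1) :: arunsA p.2
termination_by cs => cs.length
decreasing_by
  exact Nat.lt_succ_of_le (countRunA_len c xs)

def extract_rle_py (s : String) : List Int × List Int :=
  let runs := arunsA s.toList
  (((runs.filter (fun p => p.1 == '1')).map Prod.snd),
   ((runs.filter (fun p => p.1 == '0')).map Prod.snd))

-- ===== PORT B =====
-- one counter pass collecting maximal runs of ch (Source B's runs_of)
def runsOf (ch : Char) (cs : List Char) : List Int :=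
  let st := cs.foldl
    (fun (st : List Int × Int) c =>
      if c == ch then (st.1, st.2 + 1)
      else if st.2 ≠ 0 then (st.1 ++ [st.2], 0) else st)
    ([], 0)
  if st.2 ≠ 0 then st.1 ++ [st.2] else st.1

def extract_rle_py_alt (s : String) : List Int × List Int :=
  (runsOf '1' s.toList, runsOf '0' s.toList)

-- ===== PRECONDITION & SPEC =====
def Spec_extract_rle_py (s : String) (out : List Int × List Int) : Prop := out = extract_rle_py_alt s
instance (s : String) (out : List Int × List Int) : Decidable (Spec_extract_rle_py s out) := by unfold Spec_extract_rle_py; infer_instance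

-- ===== CLAIM (what is proved, stated in full; the proofs are below) =====
def Claim_equal_extract_rle_py : Prop := ∀ (s : String), Dom_extract_rle_py s → Spec_extract_rle_py s (extract_rle_py s)

-- ===== LEMMAS AND PROOFS =====

def stepF (ch : Char) (st : List Int × Int) (c : Char) : List Int × Int :=
  if c == ch then (st.1, st.2 + 1) else if st.2 ≠ 0 then (st.1 ++ [st.2], 0) else st

def flushSt (st : List Int × Int) : List Int :=
  if st.2 ≠ 0 then st.1 ++ [st.2] else st.1

-- structural version of B's fold-with-flush
def gAux (ch : Char) : List Char → Int → List Int
  | [], n => if n ≠ 0 then [n] else []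
  | c :: cs, n =>
      if c == ch then gAux ch cs (n + 1)
      else if n ≠ 0 then n :: gAux ch cs 0 else gAux ch cs 0

theorem arunsA_cons (c : Char) (xs : List Char) :
    arunsA (c :: xs) = (c, ((countRunA c xs).1 : Int) + 1) :: arunsA (countRunA c xs).2 := by
  rw [arunsA]

theorem fold_eq (ch : Char) (cs : List Char) : ∀ (out : List Int) (n : Int),
    flushSt (cs.foldl (stepF ch) (out, n)) = out ++ gAux ch cs n := by
  induction cs with
  | nil => intro out n; by_cases hn : n = 0 <;> simp [flushSt, gAux, hn]
  | cons c cs ih =>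
    intro out n
    rw [List.foldl_cons]
    by_cases hc : c == ch
    · rw [show stepF ch (out, n) c = (out, n + 1) from by simp [stepF, hc], ih]
      simp [gAux, hc]
    · by_cases hn : n = 0
      · rw [show stepF ch (out, n) c = (out, n) from by simp [stepF, hc, hn], ih]
        simp [gAux, hc, hn]
      · rw [show stepF ch (out, n) c = (out ++ [n], 0) from by simp [stepF, hc, hn], ih]
        simp [gAux, hc, hn]

theorem runsOf_eq_gAux (ch : Char) (cs : List Char) : runsOf ch cs = gAux ch cs 0 := by
  have h : runsOf ch cs = flushSt (cs.foldl (stepF ch) ([], 0)) := rfl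
  rw [h, fold_eq]
  simp

theorem gAux_replicate_same (ch : Char) (k : Nat) (r : List Char) : ∀ (n : Int),
    gAux ch (List.replicate k ch ++ r) n = gAux ch r (n + k) := by
  induction k with
  | zero => intro n; simp
  | succ k ih =>
    intro n
    simp only [List.replicate_succ, List.cons_append, gAux, beq_self_eq_true, if_true]
    rw [ih]
    congr 1
    push_cast
    ring

theorem gAux_replicate_other (ch c : Char) (hc : ¬ (c == ch) = true) (k : Nat) (r : List Char) :
    gAux ch (List.replicate k c ++ r) 0 = gAux ch r 0 := by
  induction k with
  | zero => simp
  | succ k ih =>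
    simp only [List.replicate_succ, List.cons_append, gAux, hc]
    simpa using ih

theorem gAux_flush (ch : Char) (r : List Char) (n : Int)
    (hr : ∀ y, r.head? = some y → ¬ (y == ch) = true) (hn : n ≠ 0) :
    gAux ch r n = n :: gAux ch r 0 := by
  cases r with
  | nil => simp [gAux, hn]
  | cons y r =>
    have hy := hr y rfl
    simp [gAux, hy, hn]

theorem countRunA_decomp (c : Char) (xs : List Char) :
    xs = List.replicate (countRunA c xs).1 c ++ (countRunA c xs).2 := by
  induction xs with
  | nil => simp [countRunA]
  | cons x xs ih =>
    simp only [countRunA]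
    by_cases hx : x == c
    · have hxc : x = c := by simpa using hx
      simp only [hx, if_true, List.replicate_succ, List.cons_append, List.cons.injEq]
      exact ⟨hxc, ih⟩
    · simp [hx]

theorem countRunA_head (c : Char) (xs : List Char) :
    ∀ y, (countRunA c xs).2.head? = some y → ¬ (y == c) = true := by
  induction xs with
  | nil => simp [countRunA]
  | cons x xs ih =>
    by_cases hx : x == c
    · simpa [countRunA, hx] using ih
    · intro y hy
      simp [countRunA, hx] at hy
      simpa [hy] using hx

theorem gAux_eq_filter (ch : Char) (cs : List Char) :
    gAux ch cs 0 = ((arunsA cs).filter (fun p => p.1 == ch)).map Prod.snd := by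
  induction cs using arunsA.induct with
  | case1 => simp [gAux, arunsA]
  | case2 c xs p ih =>
    have hpd : p = countRunA c xs := rfl
    have hxs : xs = List.replicate p.1 c ++ p.2 := by rw [hpd]; exact countRunA_decomp c xs
    rw [arunsA_cons, ← hpd]
    by_cases hc : c == ch
    · have hcc : c = ch := by simpa using hc
      have hhead : ∀ y, p.2.head? = some y → ¬ (y == ch) = true := by
        intro y hy
        rw [← hcc]
        exact countRunA_head c xs y (by rw [← hpd]; exact hy)
      have hne : (1 : Int) + p.1 ≠ 0 := by positivity
      calc gAux ch (c :: xs) 0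
          = gAux ch xs 1 := by simp [gAux, hc]
        _ = gAux ch p.2 (1 + (p.1 : Int)) := by
              rw [hxs, hcc]
              exact gAux_replicate_same ch p.1 p.2 1
        _ = ((1 : Int) + p.1) :: gAux ch p.2 0 := gAux_flush ch p.2 _ hhead hne
        _ = (((c, (p.1 : Int) + 1) :: arunsA p.2).filter (fun q => q.1 == ch)).map Prod.snd := by
              rw [ih, List.filter_cons]
              simp only [hc, if_true, List.map_cons]
              congr 1
              ring
    · calc gAux ch (c :: xs) 0
          = gAux ch xs 0 := by simp [gAux, hc]
        _ = gAux ch p.2 0 := by rw [hxs]; exact gAux_replicate_other ch c hc p.1 p.2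
        _ = (((c, (p.1 : Int) + 1) :: arunsA p.2).filter (fun q => q.1 == ch)).map Prod.snd := by
              rw [ih, List.filter_cons]
              simp [hc]

-- ===== VERDICT (by name: the statement is the Claim_ definition above) =====
theorem extract_rle_py_spec : Claim_equal_extract_rle_py := by
  intro s _
  unfold Spec_extract_rle_py extract_rle_py extract_rle_py_alt
  rw [runsOf_eq_gAux, runsOf_eq_gAux, gAux_eq_filter, gAux_eq_filter]
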